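-- pv_equiv track=rewrite | github.com/Vedantk1301/Muse_orchestrator | responses_agent.py | _interleave_results
-- ===== SOURCE A (Python) =====
-- from typing import Any, Dict, List, Optional, AsyncGenerator, Set
--
-- def _product_identity(product: Dict[str, Any]) -> Optional[str]:
--     return (
--         product.get("product_id")
--         or product.get("id")
--         or product.get("url")
--     )
--
-- def _interleave_results(results_lists: List[List[Dict[str, Any]]]) -> List[Dict[str, Any]]:
--     if not results_lists:
--         return []
--
--     max_len = max(len(lst) for lst in results_lists)
--     seen: Set[str] = set()
--     combined: List[Dict[str, Any]] = []
--
--     for i in range(max_len):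
--         for lst in results_lists:
--             if i >= len(lst):
--                 continue
--             product = lst[i]
--             pid = _product_identity(product)
--             if pid and pid in seen:
--                 continue
--             if pid:
--                 seen.add(pid)
--             combined.append(product)
--     return combined
-- ===== SOURCE B (Python) =====
-- from typing import Any, Dict, List, Optional
--
-- def _product_identity(product: Dict[str, Any]) -> Optional[str]:
--     return (
--         product.get("product_id")
--         or product.get("id")
--         or product.get("url")
--     )
--
-- def _interleave_results(results_lists):
--     # Pass 1: transpose — peel the lists column by column into one flat list.
--     rows = [lst for lst in results_lists if lst]
--     flat = []
--     while rows:
--         flat.extend(row[0] for row in rows)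
--         rows = [row[1:] for row in rows if len(row) > 1]
--     # Pass 2: order-preserving dedup by product identity.
--     seen = set()
--     out = []
--     for product in flat:
--         pid = _product_identity(product)
--         if pid and pid in seen:
--             continue
--         if pid:
--             seen.add(pid)
--         out.append(product)
--     return out
-- ===== Notes on version B (the rewrite author's own statement) =====
-- stated objective: alternative
-- what changed: A fuses interleaving and dedup in one index-driven nested loop over range(max_len); B splits it into two differently-shaped passes: a column-peeling while-loop that builds the interleaved flat list first, then a single dedup pass over it.
import Mathlib
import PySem

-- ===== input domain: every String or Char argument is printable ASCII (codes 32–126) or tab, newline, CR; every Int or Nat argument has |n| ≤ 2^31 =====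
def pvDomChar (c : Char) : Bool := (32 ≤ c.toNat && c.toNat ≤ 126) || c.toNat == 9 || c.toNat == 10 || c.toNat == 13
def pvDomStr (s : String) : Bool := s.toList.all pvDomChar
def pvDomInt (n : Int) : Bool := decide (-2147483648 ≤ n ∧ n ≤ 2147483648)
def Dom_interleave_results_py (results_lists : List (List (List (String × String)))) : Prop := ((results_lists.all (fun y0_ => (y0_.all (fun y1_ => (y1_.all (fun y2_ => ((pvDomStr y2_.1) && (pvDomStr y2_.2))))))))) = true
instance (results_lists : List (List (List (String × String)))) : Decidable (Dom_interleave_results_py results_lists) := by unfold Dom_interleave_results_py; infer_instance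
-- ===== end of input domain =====

-- B replaces A's fused index-driven interleave+dedup loop by two separate passes
-- (a column-peeling transpose, then a dedup scan); objective: alternative decomposition, same cost.

-- ===== PORT A =====
-- Python `a or b` on Optional[str] values (falsy = None or "")
def pyOrStr (a b : Option String) : Option String :=
  match a with
  | some s => if s = "" then b else some s
  | none => b

-- module helper _product_identity (shared source code of both Pythons)
-- `product.get(k)`: first-match lookup in the association list (List.lookup)
def product_identity (p : List (String × String)) : Option String :=
  pyOrStr (p.lookup "product_id") (pyOrStr (p.lookup "id") (p.lookup "url"))

-- the dedup step: `pid = _product_identity(product); if pid and pid in seen: continue;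
-- if pid: seen.add(pid); <acc>.append(product)` — these source lines are identical in A and in B
def dedupStep (st : PySem.Set String × List (List (String × String)))
    (product : List (String × String)) :
    PySem.Set String × List (List (String × String)) :=
  match product_identity product with
  | some s =>
      if s ≠ "" then
        if PySem.Set.contains st.1 s then st
        else (PySem.Set.add st.1 s, st.2 ++ [product])
      else (st.1, st.2 ++ [product])
  | none => (st.1, st.2 ++ [product])

def interleave_results_py (results_lists : List (List (List (String × String)))) :
    List (List (String × String)) :=
  if results_lists = [] then []
  else
    -- max(len(lst) for lst in results_lists); the generator is nonempty here, foldl max 0 is exact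
    let max_len := (results_lists.map List.length).foldl max 0
    ((List.range max_len).foldl (fun st i =>
        results_lists.foldl (fun st lst =>
          if lst.length ≤ i then st                    -- `if i >= len(lst): continue`
          else dedupStep st (lst.getD i []))           -- `product = lst[i]` (here i < len lst)
        st)
      (PySem.Set.empty, [])).2

-- ===== PORT B =====
-- termination measure facts for the `while rows:` loop (cited by peelCols's decreasing_by)
lemma peel_measure_le {α : Type} (rows : List (List α)) :
    ((((rows.filter (fun r => 1 < r.length)).map List.tail).map List.length).sum
      + ((rows.filter (fun r => 1 < r.length)).map List.tail).length)
    ≤ (rows.map List.length).sum + rows.length := by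
  induction rows with
  | nil => simp
  | cons r t ih =>
    by_cases h : 1 < r.length <;>
      simp [h, List.map_map, Function.comp_def, List.length_tail] at ih ⊢ <;> omega

lemma peel_measure_lt {α : Type} (a : List α) (as : List (List α)) :
    (((((a :: as).filter (fun r => 1 < r.length)).map List.tail).map List.length).sum
      + (((a :: as).filter (fun r => 1 < r.length)).map List.tail).length)
    < (((a :: as)).map List.length).sum + (a :: as).length := by
  have ih := peel_measure_le as
  by_cases h : 1 < a.length <;>
      simp [h, List.map_map, Function.comp_def, List.length_tail] at ih ⊢ <;> omega

-- the `while rows:` peeling loop of Source B; every row in `rows` is nonempty (filtered before the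
-- first iteration and maintained by `len(row) > 1`), so `row[0]` is ported as headD [] exactly
def peelCols (rows : List (List (List (String × String)))) : List (List (String × String)) :=
  match rows with
  | [] => []
  | a :: as =>
      (a :: as).map (fun r => r.headD []) ++
      peelCols (((a :: as).filter (fun r => 1 < r.length)).map List.tail)
termination_by (rows.map List.length).sum + rows.length
decreasing_by exact peel_measure_lt a as

def interleave_results_py_alt (results_lists : List (List (List (String × String)))) :
    List (List (String × String)) :=
  let flat := peelCols (results_lists.filter (fun r => !r.isEmpty))
  (flat.foldl dedupStep (PySem.Set.empty, [])).2

-- ===== PRECONDITION & SPEC =====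
def Spec_interleave_results_py (results_lists : List (List (List (String × String)))) (out : List (List (String × String))) : Prop := out = interleave_results_py_alt results_lists
instance (results_lists : List (List (List (String × String)))) (out : List (List (String × String))) : Decidable (Spec_interleave_results_py results_lists out) := by unfold Spec_interleave_results_py; infer_instance

-- ===== CLAIM (what is proved, stated in full; the proofs are below) =====
def Claim_equal_interleave_results_py : Prop := ∀ (results_lists : List (List (List (String × String)))), Dom_interleave_results_py results_lists → Spec_interleave_results_py results_lists (interleave_results_py results_lists)

-- ===== LEMMAS AND PROOFS =====

-- column i of the table: the i-th element of every row that has one, in row order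
def colAt (rls : List (List (List (String × String)))) (i : Nat) : List (List (String × String)) :=
  rls.filterMap (fun l => l[i]?)

lemma foldl_max_init_le (l : List Nat) (a : Nat) : a ≤ l.foldl max a := by
  induction l generalizing a with
  | nil => simp
  | cons x t ih => exact le_trans (Nat.le_max_left a x) (ih _)

lemma le_foldl_max_of_mem (l : List Nat) (a x : Nat) (h : x ∈ l) : x ≤ l.foldl max a := by
  induction l generalizing a with
  | nil => cases h
  | cons y t ih =>
    rw [List.foldl_cons]
    rcases List.mem_cons.mp h with rfl | h
    · exact le_trans (Nat.le_max_right a x) (foldl_max_init_le t _)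
    · exact ih _ h

-- A's inner row loop over one column index is the dedup fold over that column
lemma foldA_inner (rls : List (List (List (String × String)))) (i : Nat)
    (st : PySem.Set String × List (List (String × String))) :
    rls.foldl (fun st lst => if lst.length ≤ i then st else dedupStep st (lst.getD i [])) st
      = (colAt rls i).foldl dedupStep st := by
  induction rls generalizing st with
  | nil => rfl
  | cons l t ih =>
    by_cases h : l.length ≤ i
    · have hn : l[i]? = none := by rw [List.getElem?_eq_none_iff]; omega
      simp only [List.foldl_cons, if_pos h, colAt, List.filterMap_cons, hn]
      exact ih st
    · have hi : i < l.length := by omega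
      have hs : l[i]? = some l[i] := List.getElem?_eq_getElem hi
      simp only [List.foldl_cons, if_neg h, colAt, List.filterMap_cons, hs, List.foldl_cons]
      rw [ih]
      congr 2
      simp [List.getD, hs]

-- A's whole nested loop is the dedup fold over the concatenation of the columns
lemma foldA_all (rls : List (List (List (String × String)))) (n : Nat)
    (st : PySem.Set String × List (List (String × String))) :
    (List.range n).foldl (fun st i =>
        rls.foldl (fun st lst => if lst.length ≤ i then st else dedupStep st (lst.getD i [])) st) st
      = ((List.range n).flatMap (colAt rls)).foldl dedupStep st := by
  have h1 : (List.range n).foldl (fun st i =>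
      rls.foldl (fun st lst => if lst.length ≤ i then st else dedupStep st (lst.getD i [])) st) st
      = (List.range n).foldl (fun st i => (colAt rls i).foldl dedupStep st) st := by
    congr 1
    funext st i
    exact foldA_inner rls i st
  rw [h1, List.flatMap_def, List.foldl_flatten, List.foldl_map]

lemma colAt_zero (rows : List (List (List (String × String)))) (h : ∀ r ∈ rows, r ≠ []) :
    colAt rows 0 = rows.map (fun r => r.headD []) := by
  induction rows with
  | nil => rfl
  | cons r t ih =>
    match r, h r (by simp) with
    | x :: xs, _ =>
      simp only [colAt, List.filterMap_cons, List.map_cons, List.getElem?_cons_zero,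
        List.headD_cons]
      rw [← ih (fun r hr => h r (List.mem_cons_of_mem _ hr))]
      rfl

lemma colAt_succ (rows : List (List (List (String × String)))) (i : Nat) :
    colAt rows (i + 1) = colAt ((rows.filter (fun r => 1 < r.length)).map List.tail) i := by
  induction rows with
  | nil => rfl
  | cons r t ih =>
    match r with
    | [] => simpa [colAt, List.filterMap_cons, List.filter_cons] using ih
    | [x] => simpa [colAt, List.filterMap_cons, List.filter_cons] using ih
    | x :: y :: xs =>
      simp only [colAt, List.filterMap_cons, List.filter_cons] at *
      simp only [List.getElem?_cons_succ]
      cases hxy : (y :: xs)[i]? <;> simp_all [List.tail]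

lemma colAt_filter (rls : List (List (List (String × String)))) (i : Nat) :
    colAt (rls.filter (fun r => !r.isEmpty)) i = colAt rls i := by
  induction rls with
  | nil => rfl
  | cons r t ih =>
    cases r with
    | nil => simpa [colAt, List.filter_cons, List.filterMap_cons] using ih
    | cons x xs =>
      cases hxy : (x :: xs)[i]? <;>
        simp_all [colAt]

-- B's peeling loop produces exactly the concatenation of the columns
lemma peel_eq_cols (m : Nat) : ∀ (rows : List (List (List (String × String)))),
    (∀ r ∈ rows, r ≠ [] ∧ r.length ≤ m) →
    peelCols rows = (List.range m).flatMap (colAt rows) := by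
  induction m with
  | zero =>
    intro rows h
    match rows with
    | [] => simp [peelCols]
    | a :: as =>
      rcases h a (by simp) with ⟨hne, hle⟩
      cases a with
      | nil => exact absurd rfl hne
      | cons x xs => simp at hle
  | succ m ih =>
    intro rows h
    match rows with
    | [] => simp [peelCols, colAt]
    | a :: as =>
      rw [peelCols, List.range_succ_eq_map, List.flatMap_cons, List.flatMap_map]
      congr 1
      · exact (colAt_zero _ (fun r hr => (h r hr).1)).symm
      · rw [ih _ ?_]
        · simp only [Nat.succ_eq_add_one, colAt_succ]
        · intro r hr
          rcases List.mem_map.mp hr with ⟨s, hs, rfl⟩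
          rcases List.mem_filter.mp hs with ⟨hsmem, hslen⟩
          have h1 : 1 < s.length := by simpa using hslen
          rcases h s hsmem with ⟨-, hle⟩
          refine ⟨List.ne_nil_of_length_pos ?_, ?_⟩ <;>
            simp [List.length_tail] <;> omega

-- B's flat list equals the concatenation of A's columns
lemma peelB (rls : List (List (List (String × String)))) :
    peelCols (rls.filter (fun r => !r.isEmpty))
      = (List.range ((rls.map List.length).foldl max 0)).flatMap (colAt rls) := by
  rw [peel_eq_cols ((rls.map List.length).foldl max 0) _ ?_]
  · congr 1
    funext i
    exact colAt_filter rls i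
  · intro r hr
    rcases List.mem_filter.mp hr with ⟨hmem, hne⟩
    refine ⟨by simpa using hne, ?_⟩
    exact le_foldl_max_of_mem _ 0 _ (List.mem_map.mpr ⟨r, hmem, rfl⟩)

-- ===== VERDICT (by name: the statement is the Claim_ definition above) =====
theorem interleave_results_py_spec : Claim_equal_interleave_results_py := by
  intro rls _
  show interleave_results_py rls = interleave_results_py_alt rls
  by_cases hnil : rls = []
  · subst hnil
    simp [interleave_results_py, interleave_results_py_alt, peelCols]
  · simp only [interleave_results_py, interleave_results_py_alt, if_neg hnil]
    rw [foldA_all, peelB]
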